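-- pv_equiv track=rewrite | github.com/AlisterInn/BlanketOracle-Version-1.0 | BlanketOracle/prediction.py | recommend_blanket
-- ===== SOURCE A (Python) =====
-- def recommend_blanket(predicted_temp):
--   thresholds = {
--       "heavy": 14,  # Below this temperature, recommend a HEAVY blanket
--       "medium": 27,  # Between this and light, recommend a MEDIUM blanket
--       "light": None,  # Above this, recommend a LIGHT blanket
--   }
--
--   for blanket_type, threshold in thresholds.items():
--     if threshold is None or predicted_temp < threshold:
--       return blanket_type
--
--   return "light"
-- ===== SOURCE B (Python) =====
-- import bisect
--
-- _CUTS = [14, 27]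
-- _LABELS = ["heavy", "medium", "light"]
--
-- def recommend_blanket(predicted_temp):
--   return _LABELS[bisect.bisect_right(_CUTS, predicted_temp)]
-- ===== Notes on version B (the rewrite author's own statement) =====
-- stated objective: idiomatic
-- what changed: Replaces the dict iteration with an if-chain by a sorted cutoff table indexed via bisect_right.
import Mathlib
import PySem

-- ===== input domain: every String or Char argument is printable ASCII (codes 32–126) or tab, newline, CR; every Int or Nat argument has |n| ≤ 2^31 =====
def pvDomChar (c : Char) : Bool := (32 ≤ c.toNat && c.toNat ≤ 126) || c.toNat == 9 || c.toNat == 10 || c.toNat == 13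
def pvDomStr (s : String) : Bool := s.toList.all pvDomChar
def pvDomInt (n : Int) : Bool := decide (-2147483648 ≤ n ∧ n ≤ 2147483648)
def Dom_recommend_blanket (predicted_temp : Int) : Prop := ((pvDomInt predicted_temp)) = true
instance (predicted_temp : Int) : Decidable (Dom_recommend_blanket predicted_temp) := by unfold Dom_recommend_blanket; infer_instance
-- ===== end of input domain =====

-- B replaces A's dict iteration with branch chain by a sorted cutoff table indexed via bisect_right (idiomatic).


-- ===== PORT A =====
-- A's for-loop over the dict's items with early return
def rbLoop (items : List (String × Option Int)) (t : Int) : Option String :=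
  match items with
  | [] => none
  | (blanket_type, threshold) :: rest =>
    if threshold.isNone || (match threshold with | some v => t < v | none => false)
    then some blanket_type
    else rbLoop rest t

def recommend_blanket (predicted_temp : Int) : String :=
  let thresholds : List (String × Option Int) :=
    [("heavy", some 14), ("medium", some 27), ("light", none)]
  (rbLoop thresholds predicted_temp).getD "light"

-- ===== PORT B =====
-- bisect_right on a sorted list = number of elements ≤ the probe
def recommend_blanket_alt (predicted_temp : Int) : String :=
  let cuts : List Int := [14, 27]
  let labels : List String := ["heavy", "medium", "light"]
  labels.getD (cuts.countP (fun c => c ≤ predicted_temp)) "light"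

-- ===== PRECONDITION & SPEC =====
def Spec_recommend_blanket (predicted_temp : Int) (out : String) : Prop := out = recommend_blanket_alt predicted_temp
instance (predicted_temp : Int) (out : String) : Decidable (Spec_recommend_blanket predicted_temp out) := by unfold Spec_recommend_blanket; infer_instance

-- ===== CLAIM (what is proved, stated in full; the proofs are below) =====
def Claim_equal_recommend_blanket : Prop := ∀ (predicted_temp : Int), Dom_recommend_blanket predicted_temp → Spec_recommend_blanket predicted_temp (recommend_blanket predicted_temp)

-- ===== LEMMAS AND PROOFS =====

-- ===== VERDICT (by name: the statement is the Claim_ definition above) =====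
theorem recommend_blanket_spec : Claim_equal_recommend_blanket := by
  intro t _
  unfold Spec_recommend_blanket recommend_blanket recommend_blanket_alt
  by_cases h1 : t < 14
  · simp [rbLoop, List.countP, List.countP.go, h1, show ¬ (14 ≤ t) by omega, show ¬ (27 ≤ t) by omega]
  · by_cases h2 : t < 27
    · simp [rbLoop, List.countP, List.countP.go, h1, h2, show (14 ≤ t) by omega, show ¬ (27 ≤ t) by omega]
    · simp [rbLoop, List.countP, List.countP.go, h1, h2, show (14 ≤ t) by omega, show (27 ≤ t) by omega]
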